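-- pv_equiv track=rewrite | github.com/kwrobel-nlp/kftt | score_segmentation.py | get_predicted_offsets
-- ===== SOURCE A (Python) =====
-- from typing import List, Tuple
--
-- def get_predicted_offsets(paragraph: List[Tuple[str, int]]):
--     text = ''
--     end_offsets = []
--     last_offset = 0
--     last_start_offset = 0
--     sentence_end_offsets = []
--
--     last_sentence_start_offset = 0
--     for token, decision in paragraph:
--         text += token
--         if decision >= 1:
--             end_offsets.append((last_start_offset, last_offset + len(token)))
--             last_start_offset = last_offset + len(token)
--         if decision == 2:
--             sentence_end_offsets.append((last_sentence_start_offset, last_offset + len(token)))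
--             last_sentence_start_offset = last_offset + len(token)
--         last_offset += len(token)
--     return end_offsets, text, sentence_end_offsets
-- ===== SOURCE B (Python) =====
-- def _pair(bounds):
--     out = []
--     prev = 0
--     for e in bounds:
--         out.append((prev, e))
--         prev = e
--     return out
--
-- def get_predicted_offsets(paragraph):
--     text = ''.join(tok for tok, _ in paragraph)
--     ends = []
--     off = 0
--     for tok, _ in paragraph:
--         off += len(tok)
--         ends.append(off)
--     token_bounds = [e for (_, d), e in zip(paragraph, ends) if d >= 1]
--     sentence_bounds = [e for (_, d), e in zip(paragraph, ends) if d == 2]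
--     return _pair(token_bounds), text, _pair(sentence_bounds)
-- ===== Notes on version B (the rewrite author's own statement) =====
-- stated objective: alternative
-- what changed: Replaces A's single interleaved loop carrying five pieces of running state with a precompute-then-pair structure: build the text with ''.join, compute cumulative end offsets once, select the boundary offsets for decision>=1 and decision==2 by comprehension, and pair consecutive boundaries starting from 0.
import Mathlib
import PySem

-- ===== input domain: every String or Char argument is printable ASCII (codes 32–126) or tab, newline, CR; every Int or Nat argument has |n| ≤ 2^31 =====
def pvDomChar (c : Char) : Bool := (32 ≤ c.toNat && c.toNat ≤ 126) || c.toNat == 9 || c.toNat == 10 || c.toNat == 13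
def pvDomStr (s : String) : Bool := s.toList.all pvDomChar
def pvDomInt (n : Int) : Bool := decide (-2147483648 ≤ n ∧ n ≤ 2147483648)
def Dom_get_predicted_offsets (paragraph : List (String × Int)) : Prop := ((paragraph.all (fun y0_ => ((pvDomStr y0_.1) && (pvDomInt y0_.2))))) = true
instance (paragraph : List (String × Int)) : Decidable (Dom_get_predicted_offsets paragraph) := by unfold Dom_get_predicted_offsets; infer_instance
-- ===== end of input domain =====

-- B replaces A's single interleaved running-state loop by a precompute-offsets-then-pair-boundaries
-- decomposition (alternative structure, same cost).

-- ===== PORT A =====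
-- state: (text, end_offsets, last_offset, last_start_offset, sentence_end_offsets, last_sentence_start_offset)
def get_predicted_offsets (paragraph : List (String × Int)) : (List (Int × Int)) × String × (List (Int × Int)) :=
  let st := paragraph.foldl
    (fun (st : String × List (Int × Int) × Int × Int × List (Int × Int) × Int) td =>
      let text := st.1; let eo := st.2.1; let lo := st.2.2.1
      let lso := st.2.2.2.1; let seo := st.2.2.2.2.1; let lsso := st.2.2.2.2.2
      let n : Int := PySem.Str.len td.1
      let eo' := if td.2 ≥ 1 then eo ++ [(lso, lo + n)] else eo
      let lso' := if td.2 ≥ 1 then lo + n else lso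
      let seo' := if td.2 = 2 then seo ++ [(lsso, lo + n)] else seo
      let lsso' := if td.2 = 2 then lo + n else lsso
      (text ++ td.1, eo', lo + n, lso', seo', lsso'))
    ("", [], 0, 0, [], 0)
  (st.2.1, st.1, st.2.2.2.2.1)

-- ===== PORT B =====
-- _pair(bounds): pair consecutive boundaries starting from 0
def pvPairB (bounds : List Int) : List (Int × Int) :=
  (bounds.foldl (fun (st : List (Int × Int) × Int) e => (st.1 ++ [(st.2, e)], e)) ([], 0)).1

def get_predicted_offsets_alt (paragraph : List (String × Int)) : (List (Int × Int)) × String × (List (Int × Int)) :=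
  let text := PySem.Str.join "" (paragraph.map Prod.fst)
  let ends := (paragraph.foldl
      (fun (st : List Int × Int) td =>
        let off := st.2 + PySem.Str.len td.1
        (st.1 ++ [off], off)) ([], 0)).1
  let token_bounds := ((paragraph.zip ends).filter (fun p => decide (p.1.2 ≥ 1))).map (·.2)
  let sentence_bounds := ((paragraph.zip ends).filter (fun p => p.1.2 == 2)).map (·.2)
  (pvPairB token_bounds, text, pvPairB sentence_bounds)

-- ===== PRECONDITION & SPEC =====
def Spec_get_predicted_offsets (paragraph : List (String × Int)) (out : (List (Int × Int)) × String × (List (Int × Int))) : Prop := out = get_predicted_offsets_alt paragraph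
instance (paragraph : List (String × Int)) (out : (List (Int × Int)) × String × (List (Int × Int))) : Decidable (Spec_get_predicted_offsets paragraph out) := by unfold Spec_get_predicted_offsets; infer_instance

-- ===== CLAIM (what is proved, stated in full; the proofs are below) =====
def Claim_equal_get_predicted_offsets : Prop := ∀ (paragraph : List (String × Int)), Dom_get_predicted_offsets paragraph → Spec_get_predicted_offsets paragraph (get_predicted_offsets paragraph)

-- ===== LEMMAS AND PROOFS =====

-- concatenation of the tokens
def pvCat : List (String × Int) → String
  | [] => ""
  | (t, _) :: r => t ++ pvCat r

-- cumulative end offsets starting from lo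
def pvEnds : List (String × Int) → Int → List Int
  | [], _ => []
  | (t, _) :: r, lo => (lo + PySem.Str.len t) :: pvEnds r (lo + PySem.Str.len t)

-- boundary offsets selected by a predicate on the decision
def pvBnd (f : Int → Bool) : List (String × Int) → Int → List Int
  | [], _ => []
  | (t, d) :: r, lo =>
      (if f d then [lo + PySem.Str.len t] else []) ++ pvBnd f r (lo + PySem.Str.len t)

-- pair consecutive boundaries, previous boundary s
def pvPairFrom : Int → List Int → List (Int × Int)
  | _, [] => []
  | s, b :: bs => (s, b) :: pvPairFrom b bs

theorem pvLastD_cons {α : Type} (x : α) (l : List α) (s : α) :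
    (x :: l).getLast?.getD s = l.getLast?.getD x := by
  induction l generalizing x s with
  | nil => rfl
  | cons h t ih => rw [List.getLast?_cons_cons, ih, ih]

-- characterization of A's fold from an arbitrary state
theorem pvA_fold (p : List (String × Int)) (text : String) (eo : List (Int × Int)) (lo lso : Int)
    (seo : List (Int × Int)) (lsso : Int) :
    p.foldl
      (fun (st : String × List (Int × Int) × Int × Int × List (Int × Int) × Int) td =>
        let text := st.1; let eo := st.2.1; let lo := st.2.2.1
        let lso := st.2.2.2.1; let seo := st.2.2.2.2.1; let lsso := st.2.2.2.2.2
        let n : Int := PySem.Str.len td.1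
        let eo' := if td.2 ≥ 1 then eo ++ [(lso, lo + n)] else eo
        let lso' := if td.2 ≥ 1 then lo + n else lso
        let seo' := if td.2 = 2 then seo ++ [(lsso, lo + n)] else seo
        let lsso' := if td.2 = 2 then lo + n else lsso
        (text ++ td.1, eo', lo + n, lso', seo', lsso'))
      (text, eo, lo, lso, seo, lsso) =
    (text ++ pvCat p,
     eo ++ pvPairFrom lso (pvBnd (fun d => decide (d ≥ 1)) p lo),
     lo + (pvCat p).toList.length,
     (pvBnd (fun d => decide (d ≥ 1)) p lo).getLastD lso,
     seo ++ pvPairFrom lsso (pvBnd (fun d => d == 2) p lo),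
     (pvBnd (fun d => d == 2) p lo).getLastD lsso) := by
  induction p generalizing text eo lo lso seo lsso with
  | nil => simp [pvCat, pvBnd, pvPairFrom]
  | cons td r ih =>
    obtain ⟨t, d⟩ := td
    simp only [List.foldl_cons, ih]
    by_cases h1 : d ≥ 1 <;> by_cases h2 : d = 2 <;>
      simp [pvCat, pvBnd, pvPairFrom, h1, h2, String.append_assoc, List.append_assoc,
            PySem.Str.len_eq, add_assoc, pvLastD_cons]

-- characterization of B's ends fold
theorem pvB_ends (p : List (String × Int)) (acc : List Int) (lo : Int) :
    p.foldl
      (fun (st : List Int × Int) td =>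
        let off := st.2 + PySem.Str.len td.1
        (st.1 ++ [off], off)) (acc, lo) =
    (acc ++ pvEnds p lo, lo + (pvCat p).toList.length) := by
  induction p generalizing acc lo with
  | nil => simp [pvEnds, pvCat]
  | cons td r ih =>
    obtain ⟨t, d⟩ := td
    simp only [List.foldl_cons, ih]
    simp [pvEnds, pvCat, PySem.Str.len_eq, add_assoc]

-- the filtered zips equal pvBnd
theorem pvB_zip_ge (p : List (String × Int)) (lo : Int) :
    (((p.zip (pvEnds p lo)).filter (fun q => decide (q.1.2 ≥ 1))).map (·.2)) =
      pvBnd (fun d => decide (d ≥ 1)) p lo := by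
  induction p generalizing lo with
  | nil => simp [pvBnd]
  | cons td r ih =>
    obtain ⟨t, d⟩ := td
    by_cases h : d ≥ 1 <;> simp [pvEnds, pvBnd, h, ih]

theorem pvB_zip_eq2 (p : List (String × Int)) (lo : Int) :
    (((p.zip (pvEnds p lo)).filter (fun q => q.1.2 == 2)).map (·.2)) =
      pvBnd (fun d => d == 2) p lo := by
  induction p generalizing lo with
  | nil => simp [pvBnd]
  | cons td r ih =>
    obtain ⟨t, d⟩ := td
    by_cases h : d = 2 <;> simp [pvEnds, pvBnd, h, ih]

-- pvPairB equals pvPairFrom 0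
theorem pvPairB_fold (bs : List Int) (acc : List (Int × Int)) (s : Int) :
    bs.foldl (fun (st : List (Int × Int) × Int) e => (st.1 ++ [(st.2, e)], e)) (acc, s) =
    (acc ++ pvPairFrom s bs, (bs.getLastD s)) := by
  induction bs generalizing acc s with
  | nil => simp [pvPairFrom]
  | cons b bs ih => simp [pvPairFrom, ih, pvLastD_cons]

-- join "" tokens equals pvCat
theorem pvB_join (p : List (String × Int)) :
    PySem.Str.join "" (p.map Prod.fst) = pvCat p := by
  induction p with
  | nil => rfl
  | cons td r ih =>
    obtain ⟨t, d⟩ := td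
    have h : (PySem.Str.join "" (((t, d) :: r).map Prod.fst)).toList = (pvCat ((t, d) :: r)).toList := by
      rw [pvCat, String.toList_append, ← ih]
      simp only [PySem.Str.toList_join, List.map_cons]
      cases r <;> simp [PySem.Chars.join, List.intercalate]
    exact String.toList_injective h

-- ===== VERDICT (by name: the statement is the Claim_ definition above) =====
theorem get_predicted_offsets_spec : Claim_equal_get_predicted_offsets := by
  intro p _
  show _ = _
  unfold get_predicted_offsets get_predicted_offsets_alt pvPairB
  simp only [pvA_fold, pvB_ends, List.nil_append, pvB_zip_ge, pvB_zip_eq2, pvPairB_fold, pvB_join]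
  rw [String.empty_append]
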